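-- pv_equiv track=rewrite | github.com/rahulbalaji13/PLACEMENT | LitCoder/Contest/zig_zag_sequence.py | zigzag_sequence
-- ===== SOURCE A (Python) =====
-- def zigzag_sequence(arr):
--     # Sort the array to find the smallest lexicographic order
--     arr.sort()
--
--     n = len(arr)
--     k = (n + 1) // 2  # Calculate k
--
--     # Create the zigzag pattern
--     result = arr[:k] + arr[k:][::-1]  # First half increasing, second half decreasing
--
--     # Swap to form the zigzag
--     for i in range(1, k):
--         result[i], result[n - i] = result[n - i], result[i]
--
--     return result
-- ===== SOURCE B (Python) =====
-- def zigzag_sequence(arr):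
--     # Sort in place (same side effect as A), then emit the zigzag permutation
--     # directly as a slice concatenation: smallest element first, then the top
--     # half ascending, then the rest of the bottom half descending.
--     arr.sort()
--     k = (len(arr) + 1) // 2
--     return arr[:1] + arr[k:] + arr[1:k][::-1]
-- ===== Notes on version B (the rewrite author's own statement) =====
-- stated objective: simpler
-- what changed: B replaces A's build-then-swap loop (take k, reversed tail, then k-1 pairwise swaps) with a direct closed-form slice concatenation arr[:1] + arr[k:] + arr[1:k][::-1]; both keep the in-place arr.sort().
import Mathlib
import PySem

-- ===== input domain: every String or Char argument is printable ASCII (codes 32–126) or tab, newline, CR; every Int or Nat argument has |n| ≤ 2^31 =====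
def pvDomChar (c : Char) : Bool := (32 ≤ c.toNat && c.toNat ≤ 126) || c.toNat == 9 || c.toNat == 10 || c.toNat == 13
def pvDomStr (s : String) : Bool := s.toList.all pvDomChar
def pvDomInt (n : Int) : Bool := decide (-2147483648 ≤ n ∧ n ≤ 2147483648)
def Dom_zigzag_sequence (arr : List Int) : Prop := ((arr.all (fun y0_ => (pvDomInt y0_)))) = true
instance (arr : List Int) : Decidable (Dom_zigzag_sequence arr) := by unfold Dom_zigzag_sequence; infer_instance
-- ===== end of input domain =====

-- B replaces A's build-then-swap loop with one closed-form slice concatenation (both Pythons sort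
-- arr in place — the same observable mutation; the equivalence proved is about the return value).

-- ===== PORT A =====
-- loop body of 'result[i], result[n-i] = result[n-i], result[i]' (RHS pair read first, then assigned)
def zigzagStep (n : Int) (res : List Int) (i : Int) : List Int :=
  let x := PySem.List.pyGetD res i 0
  let y := PySem.List.pyGetD res (n - i) 0
  (res.set i.toNat y).set (n - i).toNat x

def zigzag_sequence (arr : List Int) : List Int :=
  let arr := PySem.List.sorted arr id
  let n : Int := arr.length
  let k : Int := PySem.Int.floordiv (n + 1) 2
  -- arr[:k] + arr[k:][::-1]  ([::-1] is reverse, PySem.List.slice?_none_none_neg_one)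
  let result := PySem.List.slice arr none (some k) ++ (PySem.List.slice arr (some k) none).reverse
  (PySem.List.pyRange 1 k 1).foldl (zigzagStep n) result

-- ===== PORT B =====
def zigzag_sequence_alt (arr : List Int) : List Int :=
  let arr := PySem.List.sorted arr id
  let k : Int := PySem.Int.floordiv ((arr.length : Int) + 1) 2
  PySem.List.slice arr none (some 1) ++ PySem.List.slice arr (some k) none
    ++ (PySem.List.slice arr (some 1) (some k)).reverse

-- ===== PRECONDITION & SPEC =====
def Spec_zigzag_sequence (arr : List Int) (out : List Int) : Prop := out = zigzag_sequence_alt arr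
instance (arr : List Int) (out : List Int) : Decidable (Spec_zigzag_sequence arr out) := by unfold Spec_zigzag_sequence; infer_instance

-- ===== CLAIM (what is proved, stated in full; the proofs are below) =====
def Claim_equal_zigzag_sequence : Prop := ∀ (arr : List Int), Dom_zigzag_sequence arr → Spec_zigzag_sequence arr (zigzag_sequence arr)

-- ===== LEMMAS AND PROOFS =====

-- After processing range(1, m), positions 1..m-1 and n-m+1..n-1 hold the mirrored element,
-- the rest are untouched (m at most (n+1)/2, so the swapped pairs are disjoint).
lemma zigzag_loop (n : Nat) (m : Nat) (res : List Int) (hlen : res.length = n)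
    (hm : 2 * m ≤ n + 1) :
    ((PySem.List.pyRange 1 (m : Int) 1).foldl (zigzagStep (n : Int)) res).length = n ∧
    ∀ j : Nat, j < n →
      ((PySem.List.pyRange 1 (m : Int) 1).foldl (zigzagStep (n : Int)) res).getD j 0 =
        if (1 ≤ j ∧ j < m) ∨ (n - m < j ∧ j < n) then res.getD (n - j) 0 else res.getD j 0 := by
  induction m with
  | zero =>
    rw [PySem.List.pyRange_one_eq_nil (by omega)]
    refine ⟨hlen, fun j hj => ?_⟩
    rw [List.foldl_nil, if_neg (by omega)]
  | succ m ih =>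
    rcases Nat.eq_zero_or_pos m with hm0 | hm1
    · subst hm0
      rw [show ((1:Nat):Int) = 1 by norm_num, PySem.List.pyRange_one_eq_nil (by omega)]
      refine ⟨hlen, fun j hj => ?_⟩
      rw [List.foldl_nil, if_neg (by omega)]
    · obtain ⟨ihlen, ihget⟩ := ih (by omega)
      have hsplit : PySem.List.pyRange 1 ((m+1 : Nat) : Int) 1
          = PySem.List.pyRange 1 (m : Int) 1 ++ [(m : Int)] := by
        push_cast
        exact PySem.List.pyRange_one_succ_right (by exact_mod_cast hm1)
      rw [hsplit, List.foldl_append]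
      set r := (PySem.List.pyRange 1 (m : Int) 1).foldl (zigzagStep (n : Int)) res with hr
      have hmlt : m < n := by omega
      have hcast : ((n : Int) - (m : Int)) = ((n - m : Nat) : Int) := by omega
      simp only [List.foldl_cons, List.foldl_nil]
      unfold zigzagStep
      rw [hcast, PySem.List.pyGetD_natCast, PySem.List.pyGetD_natCast]
      simp only [Int.toNat_natCast]
      constructor
      · simp [ihlen]
      · intro j hj
        by_cases hjm : j = m
        · subst hjm
          rw [List.getD_eq_getElem _ _ (by simp [ihlen]; omega)]
          rw [List.getElem_set_ne (by omega)]
          rw [List.getElem_set_self (by simp [ihlen]; omega)]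
          rw [ihget (n - j) (by omega)]
          rw [if_neg (by omega), if_pos (by omega)]
        · by_cases hjnm : j = n - m
          · subst hjnm
            rw [List.getD_eq_getElem _ _ (by simp [ihlen]; omega)]
            rw [List.getElem_set_self (by simp [ihlen]; omega)]
            rw [ihget m hmlt]
            rw [if_neg (by omega), if_pos (by omega)]
            rw [show n - (n - m) = m by omega]
          · rw [List.getD_eq_getElem _ _ (by simp [ihlen]; omega)]
            rw [List.getElem_set_ne (by omega), List.getElem_set_ne (by omega)]
            rw [← List.getD_eq_getElem _ 0 (by rw [ihlen]; omega)]
            rw [ihget j hj]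
            by_cases hc : (1 ≤ j ∧ j < m) ∨ (n - m < j ∧ j < n)
            · rw [if_pos hc, if_pos (by omega)]
            · rw [if_neg hc, if_neg (by omega)]

-- elementwise description of A's pre-swap list  take k ++ reverse (drop k)
lemma res0_get (s : List Int) (kn j : Nat) (hk : kn ≤ s.length) (hj : j < s.length) :
    (s.take kn ++ (s.drop kn).reverse).getD j 0 =
      if j < kn then s.getD j 0 else s.getD (s.length + kn - 1 - j) 0 := by
  by_cases h : j < kn
  · rw [if_pos h, List.getD_append _ _ _ _ (by simp; omega)]
    rw [List.getD_eq_getElem _ _ (by simp; omega), List.getD_eq_getElem _ _ hj,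
      List.getElem_take]
  · rw [if_neg h, List.getD_append_right _ _ _ _ (by simp; omega)]
    rw [List.getD_eq_getElem _ _ (by simp; omega), List.getD_eq_getElem _ _ (by omega),
      List.getElem_reverse, List.getElem_drop]
    congr 1
    simp
    omega

-- elementwise description of B's slice concatenation
lemma rhs_get (s : List Int) (kn j : Nat) (hk : 2 * kn ≤ s.length + 1) (hk2 : s.length ≤ 2 * kn)
    (hj : j < s.length) :
    (s.take 1 ++ s.drop kn ++ ((s.drop 1).take (kn - 1)).reverse).getD j 0 =
      if j = 0 then s.getD 0 0
      else if j ≤ s.length - kn then s.getD (kn + j - 1) 0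
      else s.getD (s.length - j) 0 := by
  rw [List.append_assoc]
  by_cases h0 : j = 0
  · subst h0
    rw [if_pos rfl, List.getD_append _ _ _ _ (by simp; omega),
      List.getD_eq_getElem _ _ (by simp; omega), List.getD_eq_getElem _ _ hj, List.getElem_take]
  · rw [if_neg h0, List.getD_append_right _ _ _ _ (by simp; omega)]
    by_cases h1 : j ≤ s.length - kn
    · rw [if_pos h1, List.getD_append _ _ _ _ (by simp; omega)]
      rw [List.getD_eq_getElem _ _ (by simp; omega), List.getD_eq_getElem _ _ (by omega),
        List.getElem_drop]
      congr 1
      simp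
      omega
    · rw [if_neg h1, List.getD_append_right _ _ _ _ (by simp; omega)]
      rw [List.getD_eq_getElem _ _ (by simp; omega), List.getD_eq_getElem _ _ (by omega),
        List.getElem_reverse, List.getElem_take, List.getElem_drop]
      congr 1
      simp
      omega

-- ===== VERDICT (by name: the statement is the Claim_ definition above) =====
theorem zigzag_sequence_spec : Claim_equal_zigzag_sequence := by
  intro arr _
  unfold Spec_zigzag_sequence
  simp only [zigzag_sequence, zigzag_sequence_alt]
  set s := PySem.List.sorted arr id with hs
  have hkcast : PySem.Int.floordiv ((s.length : Int) + 1) 2 = (((s.length + 1) / 2 : Nat) : Int) := by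
    rw [PySem.Int.floordiv_eq_ediv_of_pos (by norm_num)]
    omega
  rw [hkcast]
  set n := s.length with hn
  set kn := (n + 1) / 2 with hkn
  rw [PySem.List.slice_to _ (by positivity), PySem.List.slice_from _ (by positivity),
    PySem.List.slice_to _ (by norm_num), PySem.List.slice_toNat s (by norm_num) (by positivity)]
  simp only [Int.toNat_natCast, Int.toNat_one]
  have hres0len : (s.take kn ++ (s.drop kn).reverse).length = n := by
    simp
    omega
  obtain ⟨hL, hG⟩ := zigzag_loop n kn _ hres0len (by omega)
  apply List.ext_getElem
  · rw [hL]
    simp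
    omega
  · intro i h1 h2
    rw [← List.getD_eq_getElem _ 0 h1, ← List.getD_eq_getElem _ 0 h2]
    rw [hG i (by omega)]
    rw [rhs_get s kn i (by omega) (by omega) (by omega)]
    by_cases hc : (1 ≤ i ∧ i < kn) ∨ (n - kn < i ∧ i < n)
    · rw [if_pos hc, res0_get s kn (n - i) (by omega) (by omega)]
      split_ifs <;> first | rfl | omega | (congr 1; try omega)
    · rw [if_neg hc, res0_get s kn i (by omega) (by omega)]
      split_ifs <;> first | rfl | omega | (congr 1; try omega)
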